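-- pv_equiv track=rewrite | github.com/docmancer/docmancer | docmancer/bench/metrics.py | _source_matches
-- ===== SOURCE A (Python) =====
-- def _normalize_source_path(value: str) -> str:
--     return value.replace("\\", "/")
--
-- def _source_matches(retrieved: str, relevant: set[str]) -> bool:
--     """Flexible match: exact, or the retrieved path ends with a ground-truth path.
--
--     Ground truth in portable datasets is stored as `newsletters/foo.md` so the
--     same dataset works regardless of where the corpus lives on disk. A
--     retrieved source like `/Users/me/.docmancer/bench/corpora/lenny/newsletters/foo.md`
--     matches ground truth `newsletters/foo.md` because it ends with the
--     expected suffix preceded by a path separator. URL ground truths still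
--     match exactly since URLs do not contain trailing slashes before the
--     stored value.
--     """
--     if retrieved in relevant:
--         return True
--     retrieved_norm = _normalize_source_path(retrieved)
--     for gt in relevant:
--         if not gt:
--             continue
--         gt_norm = _normalize_source_path(gt)
--         if retrieved_norm == gt_norm:
--             return True
--         if retrieved_norm.endswith("/" + gt_norm):
--             return True
--     return False
-- ===== SOURCE B (Python) =====
-- def _source_matches(retrieved: str, relevant: set[str]) -> bool:
--     if retrieved in relevant:
--         return True
--     norm_set = {gt.replace("\\", "/") for gt in relevant if gt}
--     retrieved_norm = retrieved.replace("\\", "/")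
--     if retrieved_norm in norm_set:
--         return True
--     for i, ch in enumerate(retrieved_norm):
--         if ch == "/" and retrieved_norm[i + 1:] in norm_set:
--             return True
--     return False
-- ===== Notes on version B (the rewrite author's own statement) =====
-- stated objective: idiomatic
-- what changed: Instead of scanning every ground truth and running endswith per element, B builds a set of normalized non-empty ground truths once and tests the retrieved path's candidate suffixes (the full normalized path and the part after each '/') for membership in that set.
import Mathlib
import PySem

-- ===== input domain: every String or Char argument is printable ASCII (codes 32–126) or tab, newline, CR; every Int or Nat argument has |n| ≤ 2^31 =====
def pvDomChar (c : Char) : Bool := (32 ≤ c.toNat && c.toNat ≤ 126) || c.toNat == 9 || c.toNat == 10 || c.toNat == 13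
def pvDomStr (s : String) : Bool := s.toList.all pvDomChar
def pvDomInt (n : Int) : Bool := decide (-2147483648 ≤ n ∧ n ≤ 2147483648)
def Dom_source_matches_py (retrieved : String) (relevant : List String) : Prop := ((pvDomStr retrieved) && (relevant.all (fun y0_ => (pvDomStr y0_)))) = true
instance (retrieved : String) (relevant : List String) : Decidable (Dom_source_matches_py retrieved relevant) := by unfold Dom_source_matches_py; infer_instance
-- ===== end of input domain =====

-- B replaces A's per-ground-truth endswith scan by a prebuilt set of normalized
-- non-empty ground truths tested against the retrieved path's '/'-suffix candidates (idiomatic).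

-- ===== PORT A =====
-- _normalize_source_path: value.replace("\\", "/")
def pvNorm (s : String) : String := PySem.Str.replace s "\\" "/"

-- 'for gt in relevant: if …: return True' is the any-fold over the set's elements;
-- "/" + gt_norm is the cons of '/' onto gt_norm's characters (exact on ASCII via PySem.Chars.endswith).
def source_matches_py (retrieved : String) (relevant : List String) : Bool :=
  if relevant.contains retrieved then true
  else
    let retrieved_norm := pvNorm retrieved
    relevant.any (fun gt =>
      if gt = "" then false
      else
        let gt_norm := pvNorm gt
        decide (retrieved_norm = gt_norm) ||
          PySem.Chars.endswith retrieved_norm.toList ('/' :: gt_norm.toList))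

-- ===== PORT B =====
-- norm_set = {gt.replace(...) for gt in relevant if gt} (a Python set: PySem.Set of the mapped, filtered elements);
-- retrieved_norm[i+1:] with 0 ≤ i is the drop of the first i+1 characters.
def source_matches_py_alt (retrieved : String) (relevant : List String) : Bool :=
  if relevant.contains retrieved then true
  else
    let norm_set := PySem.Set.ofList ((relevant.filter (fun gt => gt ≠ "")).map pvNorm)
    let retrieved_norm := pvNorm retrieved
    if norm_set.contains retrieved_norm then true
    else
      (PySem.List.enumerate retrieved_norm.toList 0).any (fun p =>
        p.2 == '/' && norm_set.contains (String.ofList (retrieved_norm.toList.drop (p.1.toNat + 1))))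

-- ===== PRECONDITION & SPEC =====
def Spec_source_matches_py (retrieved : String) (relevant : List String) (out : Bool) : Prop := out = source_matches_py_alt retrieved relevant
instance (retrieved : String) (relevant : List String) (out : Bool) : Decidable (Spec_source_matches_py retrieved relevant out) := by unfold Spec_source_matches_py; infer_instance

-- ===== CLAIM (what is proved, stated in full; the proofs are below) =====
def Claim_equal_source_matches_py : Prop := ∀ (retrieved : String) (relevant : List String), Dom_source_matches_py retrieved relevant → Spec_source_matches_py retrieved relevant (source_matches_py retrieved relevant)

-- ===== LEMMAS AND PROOFS =====

-- a nonempty suffix c :: g of l is exactly a drop after an occurrence of c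
theorem pv_suffix_cons_iff (l g : List Char) (c : Char) :
    (c :: g) <:+ l ↔ ∃ k, ∃ _ : k < l.length, l[k] = c ∧ l.drop (k + 1) = g := by
  constructor
  · rintro ⟨p, hp⟩
    refine ⟨p.length, ?_, ?_, ?_⟩
    · subst hp; simp
    · subst hp; simp
    · subst hp; simp [List.drop_append]
  · rintro ⟨k, hk, hc, hd⟩
    refine ⟨l.take k, ?_⟩
    conv_rhs => rw [← List.take_append_drop k l]
    rw [List.drop_eq_getElem_cons hk, hc, hd]

theorem source_matches_py_eq (retrieved : String) (relevant : List String) :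
    source_matches_py retrieved relevant = source_matches_py_alt retrieved relevant := by
  unfold source_matches_py source_matches_py_alt
  by_cases hmem : retrieved ∈ relevant
  · simp [hmem]
  · rw [Bool.eq_iff_iff]
    simp [hmem, PySem.Set.mem_ofList, PySem.List.mem_enumerate_iff,
      PySem.Chars.endswith_iff, pv_suffix_cons_iff]
    constructor
    · rintro ⟨gt, hgt, hne, h | ⟨k, hk, hd⟩⟩
      · exact Or.inl ⟨gt, ⟨hgt, hne⟩, h.symm⟩
      · exact Or.inr ⟨k, hk, gt, ⟨hgt, hne⟩, by rw [eq_comm, String.ofList_eq]; exact hd⟩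
    · rintro (⟨gt, ⟨hgt, hne⟩, h⟩ | ⟨k, hk, gt, ⟨hgt, hne⟩, h⟩)
      · exact ⟨gt, hgt, hne, Or.inl h.symm⟩
      · refine ⟨gt, hgt, hne, Or.inr ⟨k, hk, ?_⟩⟩
        rw [eq_comm, String.ofList_eq] at h
        exact h

-- ===== VERDICT (by name: the statement is the Claim_ definition above) =====
theorem source_matches_py_spec : Claim_equal_source_matches_py := by
  intro retrieved relevant _
  exact source_matches_py_eq retrieved relevant
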